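-- pv_equiv track=rewrite | github.com/bliw0/- | main.py | process_arrays
-- ===== SOURCE A (Python) =====
-- def sort_special(arr: list[int]) -> list[int]:
--     positives = sorted([x for x in arr if x > 0])
--     zeros = [x for x in arr if x == 0]
--     negatives = sorted([x for x in arr if x < 0], reverse=True)
--     return positives + zeros + negatives
--
-- def diff_count(a: list[int], b: list[int]) -> int:
--     return len(set(a) ^ set(b))
--
-- def process_arrays(a: list[int], b: list[int]):
--     d = diff_count(a, b)
--
--     bset = set(b)
--     replaced_count = sum(1 for x in a if x not in bset)
--     a_replaced = [x if x in bset else 0 for x in a]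
--
--     a_sorted = sort_special(a_replaced)
--     b_sorted = sort_special(b)
--
--     return d, replaced_count, a_replaced, a_sorted, b_sorted
-- ===== SOURCE B (Python) =====
-- def sort_special(arr: list[int]) -> list[int]:
--     # one stable keyed sort: positives ascending, zeros in original order, negatives descending
--     return sorted(arr, key=lambda x: (0 if x > 0 else (1 if x == 0 else 2),
--                                       -x if x < 0 else x))
--
-- def process_arrays(a: list[int], b: list[int]):
--     bset = set(b)
--     replaced_count = 0
--     a_replaced = []
--     for x in a:
--         if x in bset:
--             a_replaced.append(x)
--         else:
--             replaced_count += 1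
--             a_replaced.append(0)
--     aset = set(a)
--     d = len(aset) + len(bset) - 2 * len(aset & bset)
--     return d, replaced_count, a_replaced, sort_special(a_replaced), sort_special(b)
-- ===== Notes on version B (the rewrite author's own statement) =====
-- stated objective: alternative
-- what changed: sort_special becomes a single stable sort with a composite (group, magnitude) key instead of three filters, two sorts and a concatenation; the replacement pass builds a_replaced and replaced_count together in one loop; and the diff count is computed by inclusion-exclusion (|A|+|B|-2|A∩B|) instead of materialising the symmetric difference.
import Mathlib
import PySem

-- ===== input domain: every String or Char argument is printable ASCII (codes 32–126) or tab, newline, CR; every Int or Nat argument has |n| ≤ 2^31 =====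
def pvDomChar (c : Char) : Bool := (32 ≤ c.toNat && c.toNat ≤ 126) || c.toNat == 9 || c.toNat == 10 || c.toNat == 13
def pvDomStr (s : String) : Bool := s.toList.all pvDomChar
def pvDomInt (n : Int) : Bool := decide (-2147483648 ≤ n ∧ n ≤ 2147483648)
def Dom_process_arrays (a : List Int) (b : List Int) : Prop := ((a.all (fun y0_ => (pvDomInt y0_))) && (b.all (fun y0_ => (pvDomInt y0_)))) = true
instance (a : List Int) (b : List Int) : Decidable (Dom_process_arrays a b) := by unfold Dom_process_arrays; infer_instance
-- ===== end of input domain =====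

-- B replaces the three-way partition + two sorts by ONE stable sort with a composite
-- (group, magnitude) key, fuses the replacement count into the replacement pass, and
-- computes the diff count by inclusion-exclusion instead of building the symmetric
-- difference (objective: alternative).

-- ===== PORT A =====
def sort_special (arr : List Int) : List Int :=
  let positives := PySem.List.sorted (arr.filter (fun x => decide (0 < x))) (fun x => x) false
  let zeros := arr.filter (fun x => decide (x = 0))
  let negatives := PySem.List.sorted (arr.filter (fun x => decide (x < 0))) (fun x => x) true
  positives ++ zeros ++ negatives

def diff_count (a : List Int) (b : List Int) : Int :=
  ((PySem.Set.symmDiff (PySem.Set.ofList a) (PySem.Set.ofList b)).length : Int)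

def process_arrays (a : List Int) (b : List Int) : Int × Int × List Int × List Int × List Int :=
  let d := diff_count a b
  let bset := PySem.Set.ofList b
  let replaced_count := a.foldl (fun s x => if bset.contains x then s else s + 1) (0 : Int)
  let a_replaced := a.map (fun x => if bset.contains x then x else 0)
  let a_sorted := sort_special a_replaced
  let b_sorted := sort_special b
  (d, replaced_count, a_replaced, a_sorted, b_sorted)

-- ===== PORT B =====
def pvGrp (x : Int) : Int := if 0 < x then 0 else if x = 0 then 1 else 2
def pvMag (x : Int) : Int := if x < 0 then -x else x

-- one stable keyed sort: positives ascending, zeros in input order, negatives descending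
def sort_special_alt (arr : List Int) : List Int :=
  PySem.List.sorted2 arr pvGrp pvMag false

def process_arrays_alt (a : List Int) (b : List Int) : Int × Int × List Int × List Int × List Int :=
  let bset := PySem.Set.ofList b
  let st := a.foldl (fun (p : Int × List Int) x =>
      if bset.contains x then (p.1, p.2 ++ [x]) else (p.1 + 1, p.2 ++ [0])) ((0 : Int), ([] : List Int))
  let replaced_count := st.1
  let a_replaced := st.2
  let aset := PySem.Set.ofList a
  let d := (aset.length : Int) + (bset.length : Int) - 2 * ((PySem.Set.inter aset bset).length : Int)
  (d, replaced_count, a_replaced, sort_special_alt a_replaced, sort_special_alt b)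

-- ===== PRECONDITION & SPEC =====
def Spec_process_arrays (a : List Int) (b : List Int) (out : Int × Int × List Int × List Int × List Int) : Prop := out = process_arrays_alt a b
instance (a : List Int) (b : List Int) (out : Int × Int × List Int × List Int × List Int) : Decidable (Spec_process_arrays a b out) := by unfold Spec_process_arrays; infer_instance

-- ===== CLAIM (what is proved, stated in full; the proofs are below) =====
def Claim_equal_process_arrays : Prop := ∀ (a : List Int) (b : List Int), Dom_process_arrays a b → Spec_process_arrays a b (process_arrays a b)

-- ===== LEMMAS AND PROOFS =====

-- the composite key of B's single sort, valued in the lexicographic order on pairs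
def pvKeyL (x : Int) : Lex (Int × Int) := toLex (pvGrp x, pvMag x)

theorem pvKeyL_inj : Function.Injective pvKeyL := by
  intro x y h
  have h' : (pvGrp x, pvMag x) = (pvGrp y, pvMag y) := toLex.injective h
  have h1 : pvGrp x = pvGrp y := congrArg Prod.fst h'
  have h2 : pvMag x = pvMag y := congrArg Prod.snd h'
  unfold pvGrp at h1; unfold pvMag at h2
  split_ifs at h1 h2 <;> omega

-- the two-key comparison of sorted2 is the lexicographic comparison of the pair key
theorem before_eq (k1 k2 : Int → Int) :
    (fun a b => decide (k1 a < k1 b) || (!decide (k1 b < k1 a) && decide (k2 a < k2 b)))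
      = (fun a b => decide ((toLex (k1 a, k2 a) : Lex (Int × Int)) < toLex (k1 b, k2 b))) := by
  funext a b
  rcases lt_trichotomy (k1 a) (k1 b) with h | h | h
  · simp [h, Prod.Lex.toLex_lt_toLex]
  · simp [h, Prod.Lex.toLex_lt_toLex]
  · simp [h, not_lt.2 h.le, Prod.Lex.toLex_lt_toLex, h.ne']

theorem sorted2_eq_lex (xs : List Int) (k1 k2 : Int → Int) :
    PySem.List.sorted2 xs k1 k2 false
      = PySem.List.sorted xs (fun x => (toLex (k1 x, k2 x) : Lex (Int × Int))) false := by
  rw [PySem.List.sorted_eq_foldl_insertBy]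
  show xs.foldl (fun acc x => PySem.List.insertBy
      (fun a b => decide (k1 a < k1 b) || (!decide (k1 b < k1 a) && decide (k2 a < k2 b))) x acc) [] = _
  rw [before_eq]

theorem sort_special_alt_eq (arr : List Int) :
    sort_special_alt arr = PySem.List.sorted arr pvKeyL false :=
  sorted2_eq_lex arr pvGrp pvMag

-- a reverse sort is the forward sort by the order-dual key
theorem sorted_rev_eq_dual (xs : List Int) :
    PySem.List.sorted xs (fun x => x) true
      = PySem.List.sorted xs (fun x => OrderDual.toDual x) false := by
  rw [PySem.List.sorted_rev_eq_foldl_insertBy, PySem.List.sorted_eq_foldl_insertBy]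
  have h : (fun (a b : Int) => decide (b < a))
      = fun a b => decide (OrderDual.toDual a < OrderDual.toDual b) := by
    funext a b; simp
  rw [h]

theorem key_mono (a b : Int)
    (hab : (0 < a ∧ 0 < b ∧ a ≤ b) ∨ (a = 0 ∧ b = 0) ∨ (a < 0 ∧ b < 0 ∧ b ≤ a)
         ∨ (0 < a ∧ b = 0) ∨ (0 < a ∧ b < 0) ∨ (a = 0 ∧ b < 0)) :
    pvKeyL a ≤ pvKeyL b := by
  apply Prod.Lex.toLex_le_toLex.mpr
  show pvGrp a < pvGrp b ∨ pvGrp a = pvGrp b ∧ pvMag a ≤ pvMag b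
  unfold pvGrp pvMag
  split_ifs <;> omega

-- A's partitioned sort equals B's single lex-keyed sort
theorem sort_special_eq (arr : List Int) :
    sort_special arr = PySem.List.sorted arr pvKeyL false := by
  show (PySem.List.sorted (arr.filter (fun x => decide (0 < x))) (fun x => x) false)
      ++ (arr.filter (fun x => decide (x = 0)))
      ++ (PySem.List.sorted (arr.filter (fun x => decide (x < 0))) (fun x => x) true)
        = PySem.List.sorted arr pvKeyL false
  have hposmem : ∀ x ∈ PySem.List.sorted (arr.filter (fun x => decide (0 < x))) (fun x => x) false, 0 < x := by
    intro x hx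
    have hx' := (PySem.List.sorted_perm (arr.filter (fun x => decide (0 < x))) (fun x => x) false).mem_iff.mp hx
    simpa using (List.mem_filter.mp hx').2
  have hzeromem : ∀ x ∈ arr.filter (fun x => decide (x = 0)), x = 0 := by
    intro x hx; simpa using (List.mem_filter.mp hx).2
  rw [sorted_rev_eq_dual, List.append_assoc]
  have hnegmem : ∀ x ∈ PySem.List.sorted (arr.filter (fun x => decide (x < 0))) (fun x => OrderDual.toDual x) false, x < 0 := by
    intro x hx
    have hx' := (PySem.List.sorted_perm (arr.filter (fun x => decide (x < 0))) (fun x => OrderDual.toDual x) false).mem_iff.mp hx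
    simpa using (List.mem_filter.mp hx').2
  apply PySem.List.eq_of_perm_of_pairwise_le_of_injective pvKeyL pvKeyL_inj
  · -- both sides are permutations of arr
    have h1 := PySem.List.sorted_perm (arr.filter (fun x => decide (0 < x))) (fun x => x) false
    have h3 := PySem.List.sorted_perm (arr.filter (fun x => decide (x < 0))) (fun x => OrderDual.toDual x) false
    have hA := List.filter_append_perm (fun x => decide (0 < x)) arr
    have hB := List.filter_append_perm (fun x => decide (x = 0)) (arr.filter (fun x => !decide (0 < x)))
    rw [List.filter_filter, List.filter_filter] at hB
    have e1 : arr.filter (fun a => decide (a = 0) && !decide (0 < a)) = arr.filter (fun x => decide (x = 0)) :=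
      List.filter_congr (by intro x _; by_cases h : x = 0 <;> simp [h])
    have e2 : arr.filter (fun a => !decide (a = 0) && !decide (0 < a)) = arr.filter (fun x => decide (x < 0)) :=
      List.filter_congr (by intro x _; by_cases h : x < 0 <;> simp [h] <;> omega)
    rw [e1, e2] at hB
    have hsplit := ((List.Perm.refl (arr.filter (fun x => decide (0 < x)))).append hB).trans hA
    exact ((h1.append ((List.Perm.refl _).append h3)).trans hsplit).trans
      (PySem.List.sorted_perm arr pvKeyL false).symm
  · -- A's concatenation is sorted under the lex key
    refine List.pairwise_append.mpr ⟨?_, List.pairwise_append.mpr ⟨?_, ?_, ?_⟩, ?_⟩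
    · exact (PySem.List.sorted_pairwise (arr.filter (fun x => decide (0 < x))) (fun x => x)).imp_of_mem
        (fun ha hb hle => key_mono _ _ (Or.inl ⟨hposmem _ ha, hposmem _ hb, hle⟩))
    · exact List.pairwise_of_forall_mem_list
        (fun a ha b hb => key_mono _ _ (Or.inr (Or.inl ⟨hzeromem _ ha, hzeromem _ hb⟩)))
    · exact (PySem.List.sorted_pairwise (arr.filter (fun x => decide (x < 0))) (fun x => OrderDual.toDual x)).imp_of_mem
        (fun ha hb hle => key_mono _ _ (Or.inr (Or.inr (Or.inl ⟨hnegmem _ ha, hnegmem _ hb, hle⟩))))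
    · intro a ha b hb
      exact key_mono _ _ (Or.inr (Or.inr (Or.inr (Or.inr (Or.inr ⟨hzeromem _ ha, hnegmem _ hb⟩)))))
    · intro a ha b hb
      rcases List.mem_append.mp hb with hb | hb
      · exact key_mono _ _ (Or.inr (Or.inr (Or.inr (Or.inl ⟨hposmem _ ha, hzeromem _ hb⟩))))
      · exact key_mono _ _ (Or.inr (Or.inr (Or.inr (Or.inr (Or.inl ⟨hposmem _ ha, hnegmem _ hb⟩)))))
  · exact PySem.List.sorted_pairwise arr pvKeyL

-- B's fused replacement loop is A's (count, map) pair
theorem repl_loop_pre (bset : PySem.Set Int) (a : List Int) : ∀ (c : Int) (acc : List Int),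
    a.foldl (fun (p : Int × List Int) x =>
        if bset.contains x then (p.1, p.2 ++ [x]) else (p.1 + 1, p.2 ++ [0])) (c, acc)
      = (a.foldl (fun s x => if bset.contains x then s else s + 1) c,
         acc ++ a.map (fun x => if bset.contains x then x else 0)) := by
  induction a with
  | nil => simp
  | cons y ys ih =>
      intro c acc
      simp only [List.foldl_cons, List.map_cons]
      by_cases h : bset.contains y = true
      · rw [if_pos h, if_pos h, if_pos h, ih]; simp
      · rw [if_neg h, if_neg h, if_neg h, ih]; simp

theorem repl_loop_eq (a : List Int) (bset : PySem.Set Int) :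
    a.foldl (fun (p : Int × List Int) x =>
        if bset.contains x then (p.1, p.2 ++ [x]) else (p.1 + 1, p.2 ++ [0])) ((0 : Int), ([] : List Int))
      = (a.foldl (fun s x => if bset.contains x then s else s + 1) (0 : Int),
         a.map (fun x => if bset.contains x then x else 0)) := by
  rw [repl_loop_pre]; simp

-- |S| = |S ∩ T| + |S \ T| and the symmetry of the intersection count on nodup lists
theorem inter_len_symm (s t : List Int) (hs : s.Nodup) :
    (s.filter (fun x => t.contains x)).length = (s.toFinset ∩ t.toFinset).card := by
  rw [← List.toFinset_card_of_nodup (hs.filter _), List.toFinset_filter]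
  congr 1
  rw [← Finset.filter_mem_eq_inter]
  apply Finset.filter_congr
  intro x hx
  simp

-- inclusion–exclusion: |A ^ B| = |A| + |B| - 2·|A ∩ B|
theorem diff_count_eq (a b : List Int) :
    diff_count a b
      = ((PySem.Set.ofList a).length : Int) + ((PySem.Set.ofList b).length : Int)
        - 2 * ((PySem.Set.inter (PySem.Set.ofList a) (PySem.Set.ofList b)).length : Int) := by
  have hs := PySem.Set.nodup_ofList a
  have ht := PySem.Set.nodup_ofList b
  unfold diff_count
  set s := PySem.Set.ofList a with hsdef
  set t := PySem.Set.ofList b with htdef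
  have h1 := List.length_eq_length_filter_add (l := s) (fun x => PySem.Set.contains t x)
  have h2 := List.length_eq_length_filter_add (l := t) (fun x => PySem.Set.contains s x)
  have h3 : (s.filter (fun x => PySem.Set.contains t x)).length
      = (t.filter (fun x => PySem.Set.contains s x)).length := by
    simp only [PySem.Set.contains]
    rw [inter_len_symm s t hs, inter_len_symm t s ht, Finset.inter_comm]
  simp only [PySem.Set.symmDiff, PySem.Set.diff, PySem.Set.inter, List.length_append]
  push_cast
  omega

-- ===== VERDICT (by name: the statement is the Claim_ definition above) =====
theorem process_arrays_spec : Claim_equal_process_arrays := by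
  intro a b _
  show _ = _
  unfold process_arrays process_arrays_alt
  simp only [diff_count_eq, sort_special_eq, sort_special_alt_eq, repl_loop_eq]
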